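-- pv_equiv track=rewrite | github.com/joseulloa10272/ProyectoQA | Vista/menuContratos.py | _normalize_activo_id
-- ===== SOURCE A (Python) =====
-- def _normalize_activo_id(s: str) -> str:
--     if s is None:
--         return ""
--     txt = str(s).strip().strip("[]()\"' ")
--     if "-" in txt:
--         txt = txt.split("-", 1)[0].strip()
--     if " " in txt:
--         txt = txt.split(" ", 1)[0].strip()
--     return "".join(ch for ch in txt if ch.isalnum())
-- ===== SOURCE B (Python) =====
-- def _normalize_activo_id(s: str) -> str:
--     if s is None:
--         return ""
--     txt = str(s).strip().strip("[]()\"' ")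
--     i = txt.find("-")
--     head = txt[:i].lstrip() if i >= 0 else txt
--     out = []
--     for ch in head:
--         if ch == " ":
--             break
--         if ch.isalnum():
--             out.append(ch)
--     return "".join(out)
-- ===== Notes on version B (the rewrite author's own statement) =====
-- stated objective: alternative
-- what changed: Replaces the membership-test + split/strip + split/strip + final alnum comprehension chain by a find-and-slice for the hyphen cut (lstrip only, the trailing strip being absorbed by the alnum filter) followed by one fused early-terminating scan that breaks at the first space and filters alnum in the same pass.
import Mathlib
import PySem

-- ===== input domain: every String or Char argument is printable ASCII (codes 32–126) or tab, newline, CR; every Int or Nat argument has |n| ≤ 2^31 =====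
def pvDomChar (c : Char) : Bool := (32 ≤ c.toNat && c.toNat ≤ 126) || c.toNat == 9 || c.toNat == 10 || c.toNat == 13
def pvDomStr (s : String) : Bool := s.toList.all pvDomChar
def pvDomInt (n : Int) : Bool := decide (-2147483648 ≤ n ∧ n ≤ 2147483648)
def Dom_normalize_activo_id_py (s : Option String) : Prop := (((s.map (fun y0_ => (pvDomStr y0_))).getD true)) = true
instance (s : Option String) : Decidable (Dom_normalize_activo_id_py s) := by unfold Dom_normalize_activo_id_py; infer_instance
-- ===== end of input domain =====

-- B replaces A's membership-test + split/strip chain by a find-and-slice for the hyphen cut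
-- plus one fused early-terminating scan (break at the first space, filter alnum in the same pass).

-- ===== PORT A =====
def normalize_activo_id_py (s : Option String) : String :=
  match s with
  | none => ""
  | some s0 =>
    let txt0 := PySem.Str.stripChars (PySem.Str.strip s0) "[]()\"' "
    let txt1 := if PySem.Str.isIn "-" txt0 then
        PySem.Str.strip ((PySem.List.pyGet? ((PySem.Str.splitMax? txt0 "-" 1).getD []) 0).getD "")
      else txt0
    let txt2 := if PySem.Str.isIn " " txt1 then
        PySem.Str.strip ((PySem.List.pyGet? ((PySem.Str.splitMax? txt1 " " 1).getD []) 0).getD "")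
      else txt1
    String.ofList (txt2.toList.filter PySem.Chars.isalnum)

-- ===== PORT B =====
-- B's loop «for ch in head: if ch == " ": break; if ch.isalnum(): out.append(ch)»
def pvScanB : List Char → List Char
  | [] => []
  | c :: r => if c = ' ' then [] else if PySem.Chars.isalnum c then c :: pvScanB r else pvScanB r

def normalize_activo_id_py_alt (s : Option String) : String :=
  match s with
  | none => ""
  | some s0 =>
    let txt := PySem.Str.stripChars (PySem.Str.strip s0) "[]()\"' "
    let i := PySem.Str.find txt "-"
    let head := if 0 ≤ i then PySem.Str.lstrip (PySem.Str.slice txt none (some i)) else txt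
    String.ofList (pvScanB head.toList)

-- ===== PRECONDITION & SPEC =====
def Spec_normalize_activo_id_py (s : Option String) (out : String) : Prop := out = normalize_activo_id_py_alt s
instance (s : Option String) (out : String) : Decidable (Spec_normalize_activo_id_py s out) := by unfold Spec_normalize_activo_id_py; infer_instance

-- ===== CLAIM (what is proved, stated in full; the proofs are below) =====
def Claim_equal_normalize_activo_id_py : Prop := ∀ (s : Option String), Dom_normalize_activo_id_py s → Spec_normalize_activo_id_py s (normalize_activo_id_py s)

-- ===== LEMMAS AND PROOFS =====

-- proof-only helpers: the two programs' character-level pipelines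
def pvA1 (t : List Char) : List Char :=
  if '-' ∈ t then PySem.Chars.strip (t.takeWhile (· ≠ '-')) else t
def pvA2 (t : List Char) : List Char :=
  if ' ' ∈ t then PySem.Chars.strip (t.takeWhile (· ≠ ' ')) else t
def pvB1 (t : List Char) : List Char :=
  if '-' ∈ t then PySem.Chars.lstrip (t.takeWhile (· ≠ '-')) else t

theorem pv_isspace_not_alnum (c : Char) (h : PySem.Chars.isspace c = true) :
    PySem.Chars.isalnum c = false := by
  by_contra hc
  rw [Bool.not_eq_false] at hc
  simp only [PySem.Chars.isalnum, PySem.Chars.isalpha, PySem.Chars.isdigit,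
    PySem.Chars.isupper, PySem.Chars.islower, Bool.or_eq_true, Bool.and_eq_true,
    decide_eq_true_eq] at hc
  simp only [PySem.Chars.isspace, Bool.or_eq_true, Bool.and_eq_true, decide_eq_true_eq,
    Char.toNat] at h
  rcases hc with (⟨h1, h2⟩ | ⟨h1, h2⟩) | ⟨h1, h2⟩ <;>
    · rw [Char.le_def, UInt32.le_iff_toNat_le] at h1 h2
      simp only [show ('A').val.toNat = 65 from rfl, show ('Z').val.toNat = 90 from rfl,
        show ('a').val.toNat = 97 from rfl, show ('z').val.toNat = 122 from rfl,
        show ('0').val.toNat = 48 from rfl, show ('9').val.toNat = 57 from rfl] at h1 h2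
      omega

theorem pv_filter_lstrip (x : List Char) :
    (PySem.Chars.lstrip x).filter PySem.Chars.isalnum = x.filter PySem.Chars.isalnum := by
  have h0 : (x.takeWhile PySem.Chars.isspace).filter PySem.Chars.isalnum = [] :=
    List.filter_eq_nil_iff.mpr fun a ha => by
      simp [pv_isspace_not_alnum a (List.mem_takeWhile_imp ha)]
  unfold PySem.Chars.lstrip
  conv_rhs => rw [← List.takeWhile_append_dropWhile (p := PySem.Chars.isspace) (l := x)]
  rw [List.filter_append, h0, List.nil_append]

theorem pv_rstrip_decomp (x : List Char) :
    PySem.Chars.rstrip x ++ (x.reverse.takeWhile PySem.Chars.isspace).reverse = x := by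
  unfold PySem.Chars.rstrip
  rw [← List.reverse_append, List.takeWhile_append_dropWhile, List.reverse_reverse]

theorem pv_filter_rstrip (x : List Char) :
    (PySem.Chars.rstrip x).filter PySem.Chars.isalnum = x.filter PySem.Chars.isalnum := by
  have h0 : ((x.reverse.takeWhile PySem.Chars.isspace).reverse).filter PySem.Chars.isalnum = [] :=
    List.filter_eq_nil_iff.mpr fun a ha => by
      simp [pv_isspace_not_alnum a (List.mem_takeWhile_imp (List.mem_reverse.mp ha))]
  conv_rhs => rw [← pv_rstrip_decomp x]
  rw [List.filter_append, h0, List.append_nil]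

theorem pv_filter_strip (x : List Char) :
    (PySem.Chars.strip x).filter PySem.Chars.isalnum = x.filter PySem.Chars.isalnum := by
  unfold PySem.Chars.strip
  rw [pv_filter_rstrip, pv_filter_lstrip]

-- go with an exhausted maxsplit budget returns the remainder as one piece
theorem pv_go_zero (sep : List Char) (fuel : ℕ) (l cur : List Char) (acc : List (List Char)) :
    PySem.Chars.splitOnMax.go sep fuel 0 l cur acc = ((cur.reverse ++ l) :: acc).reverse := by
  cases fuel with
  | zero => simp [PySem.Chars.splitOnMax.go]
  | succ f => cases l with
    | nil => simp [PySem.Chars.splitOnMax.go]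
    | cons a r => simp [PySem.Chars.splitOnMax.go]

-- go with budget 1 and a one-character separator cuts at its first occurrence
theorem pv_go_one (c : Char) (fuel : ℕ) (l cur : List Char) (acc : List (List Char))
    (h : l.length < fuel) :
    PySem.Chars.splitOnMax.go [c] fuel 1 l cur acc =
      acc.reverse ++ (if c ∈ l then
        [cur.reverse ++ l.takeWhile (· ≠ c), (l.dropWhile (· ≠ c)).tail]
      else [cur.reverse ++ l]) := by
  induction fuel generalizing l cur acc with
  | zero => omega
  | succ f ih =>
    cases l with
    | nil => simp [PySem.Chars.splitOnMax.go]
    | cons a r =>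
      by_cases hac : a = c
      · subst hac
        simp [PySem.Chars.splitOnMax.go, List.isPrefixOf, pv_go_zero]
      · have hr : r.length < f := by simp at h; omega
        rw [show PySem.Chars.splitOnMax.go [c] (f+1) 1 (a::r) cur acc
            = PySem.Chars.splitOnMax.go [c] f 1 r (a::cur) acc from by
          simp [PySem.Chars.splitOnMax.go, List.isPrefixOf, Ne.symm hac]]
        rw [ih r (a :: cur) acc hr]
        simp [hac, Ne.symm hac]

theorem pv_singleton_prefix (c : Char) (l : List Char) : [c] <+: l ↔ l.head? = some c := by
  cases l with
  | nil => simp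
  | cons a r => simp [List.cons_prefix_cons, eq_comm]

theorem pv_take_eq_takeWhile {α : Type} (p : α → Bool) :
    ∀ (t : List α) (n : ℕ), (∀ x ∈ t.take n, p x = true) →
      (∀ h : n < t.length, p t[n] = false) → t.take n = t.takeWhile p := by
  intro t
  induction t with
  | nil => intro n _ _; simp
  | cons a r ih =>
    intro n h1 h2
    cases n with
    | zero =>
      have := h2 (by simp)
      simp at this
      simp [this]
    | succ m =>
      have ha : p a = true := h1 a (by simp)
      rw [List.take_succ_cons, List.takeWhile_cons, if_pos ha]
      rw [ih m (fun x hx => h1 x (by simp [hx])) (fun h => by simpa using h2 (by simpa using h))]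

theorem pv_take_find (c : Char) (t : List Char) (hm : c ∈ t) :
    t.take (PySem.Chars.find t [c]).toNat = t.takeWhile (· ≠ c) := by
  have hn : 0 ≤ PySem.Chars.find t [c] :=
    (PySem.Chars.find_nonneg_iff t [c]).mpr ((List.singleton_infix_iff c t).mpr hm)
  obtain ⟨hpre, hmin⟩ := PySem.Chars.find_spec hn
  set n := (PySem.Chars.find t [c]).toNat with hdef
  rw [pv_singleton_prefix] at hpre
  have hlen : n < t.length := by
    by_contra hge
    rw [List.drop_eq_nil_of_le (by omega)] at hpre
    simp at hpre
  apply pv_take_eq_takeWhile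
  · intro x hx
    obtain ⟨i, hi, rfl⟩ := List.mem_iff_getElem.mp hx
    have hilt : i < n := (by simpa using hi : i < n ∧ i < t.length).1
    have := hmin i hilt
    rw [pv_singleton_prefix] at this
    have hd : (List.drop i t).head? = some t[i] := by
      rw [List.head?_drop]
      simp [List.getElem?_eq_getElem (by omega : i < t.length)]
    simp only [List.getElem_take]
    simp only [hd] at this
    simp only [decide_eq_true_eq, ne_eq]
    intro heq
    exact this (by rw [heq])
  · intro h
    have hd : (List.drop n t).head? = some t[n] := by
      rw [List.head?_drop]
      simp [List.getElem?_eq_getElem hlen]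
    rw [hd] at hpre
    simp at hpre
    simp [hpre]

theorem pv_scanB_eq (xs : List Char) :
    pvScanB xs = (xs.takeWhile (· ≠ ' ')).filter PySem.Chars.isalnum := by
  induction xs with
  | nil => simp [pvScanB]
  | cons c r ih =>
    by_cases hc : c = ' '
    · simp [pvScanB, hc]
    · by_cases ha : PySem.Chars.isalnum c <;> simp [pvScanB, hc, ha, ih]

-- the crux: A's space stage applied after an rstrip equals the plain space cut, under the alnum filter
theorem pv_core2 (h : List Char) :
    (pvA2 (PySem.Chars.rstrip h)).filter PySem.Chars.isalnum =
      (h.takeWhile (· ≠ ' ')).filter PySem.Chars.isalnum := by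
  set a1 := PySem.Chars.rstrip h with ha1
  set tr := (h.reverse.takeWhile PySem.Chars.isspace).reverse with htr
  have hdec : a1 ++ tr = h := pv_rstrip_decomp h
  have htrsp : ∀ x ∈ tr, PySem.Chars.isspace x = true := fun x hx =>
    List.mem_takeWhile_imp (List.mem_reverse.mp hx)
  unfold pvA2
  by_cases hsp : ' ' ∈ a1
  · rw [if_pos hsp, pv_filter_strip]
    congr 1
    rw [← hdec, List.takeWhile_append]
    rw [if_neg]
    intro hlen
    have : a1.takeWhile (· ≠ ' ') = a1 :=
      (List.IsPrefix.eq_of_length (List.takeWhile_prefix _) hlen)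
    have := List.takeWhile_eq_self_iff.mp this _ hsp
    simp at this
  · rw [if_neg hsp, ← hdec, List.takeWhile_append]
    have hall : a1.takeWhile (· ≠ ' ') = a1 :=
      List.takeWhile_eq_self_iff.mpr (fun x hx => by
        simp only [decide_eq_true_eq, ne_eq]
        exact fun he => hsp (he ▸ hx))
    rw [if_pos (by rw [hall]), List.filter_append]
    have h0 : (tr.takeWhile (· ≠ ' ')).filter PySem.Chars.isalnum = [] :=
      List.filter_eq_nil_iff.mpr fun a ha => by
        simp [pv_isspace_not_alnum a (htrsp a ((List.takeWhile_prefix _).subset ha))]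
    rw [h0, List.append_nil]

theorem pv_core (t : List Char) :
    (pvA2 (pvA1 t)).filter PySem.Chars.isalnum = pvScanB (pvB1 t) := by
  rw [pv_scanB_eq]
  unfold pvA1 pvB1
  by_cases hm : '-' ∈ t
  · rw [if_pos hm, if_pos hm]
    show (pvA2 (PySem.Chars.strip _)).filter _ = _
    unfold PySem.Chars.strip
    exact pv_core2 (PySem.Chars.lstrip (t.takeWhile (· ≠ '-')))
  · rw [if_neg hm, if_neg hm]
    unfold pvA2
    by_cases hsp : ' ' ∈ t
    · rw [if_pos hsp, pv_filter_strip]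
    · rw [if_neg hsp]
      congr 1
      exact (List.takeWhile_eq_self_iff.mpr (fun x hx => by
        simp only [decide_eq_true_eq, ne_eq]
        exact fun he => hsp (he ▸ hx))).symm

-- one split-strip stage of A, at the character level
theorem pv_stage (x : String) (sep : String) (c : Char) (hsep : sep.toList = [c]) :
    (if PySem.Str.isIn sep x then
        PySem.Str.strip ((PySem.List.pyGet? ((PySem.Str.splitMax? x sep 1).getD []) 0).getD "")
      else x).toList
    = if c ∈ x.toList then PySem.Chars.strip (x.toList.takeWhile (· ≠ c)) else x.toList := by
  by_cases hm : c ∈ x.toList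
  · rw [if_pos hm, if_pos]
    · have hsplit : PySem.Chars.splitOnMax x.toList [c] 1 =
          [x.toList.takeWhile (· ≠ c), (x.toList.dropWhile (· ≠ c)).tail] := by
        unfold PySem.Chars.splitOnMax
        rw [if_neg (by norm_num)]
        rw [show (1:Int).toNat = 1 from rfl]
        rw [pv_go_one c (x.toList.length + 1) x.toList [] [] (by omega)]
        simp [hm]
      rw [PySem.Str.splitMax?]
      rw [hsep]
      rw [PySem.Chars.splitMax?]
      rw [if_neg (by simp)]
      rw [hsplit]
      simp only [Option.map_some, Option.getD_some, List.map_cons, List.map_nil]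
      rw [show (0 : ℤ) = ((0 : ℕ) : ℤ) from rfl, PySem.List.pyGet?_natCast]
      simp only [List.getElem?_cons_zero, Option.getD_some]
      rw [PySem.Str.toList_strip]
      simp
    · rw [PySem.Str.isIn_eq, hsep]
      exact (PySem.Chars.isIn_iff_infix [c] x.toList).mpr ((List.singleton_infix_iff c x.toList).mpr hm)
  · rw [if_neg hm, if_neg]
    rw [PySem.Str.isIn_eq, hsep]
    rw [Bool.not_eq_true, PySem.Chars.isIn_eq_false_iff]
    exact fun hin => hm ((List.singleton_infix_iff c x.toList).mp hin)

theorem pv_A_some (s0 : String) :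
    normalize_activo_id_py (some s0) =
      String.ofList ((pvA2 (pvA1 (PySem.Str.stripChars (PySem.Str.strip s0) "[]()\"' ").toList)).filter
        PySem.Chars.isalnum) := by
  simp only [normalize_activo_id_py]
  refine congrArg String.ofList (congrArg (List.filter PySem.Chars.isalnum) ?_)
  rw [pv_stage _ " " ' ' rfl, pv_stage _ "-" '-' rfl]
  simp only [pvA1, pvA2]

theorem pv_B_some (s0 : String) :
    normalize_activo_id_py_alt (some s0) =
      String.ofList (pvScanB (pvB1 (PySem.Str.stripChars (PySem.Str.strip s0) "[]()\"' ").toList)) := by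
  simp only [normalize_activo_id_py_alt]
  refine congrArg String.ofList (congrArg pvScanB ?_)
  set x := PySem.Str.stripChars (PySem.Str.strip s0) "[]()\"' " with hx
  rw [PySem.Str.find_eq, show ("-" : String).toList = ['-'] from rfl]
  by_cases hm : '-' ∈ x.toList
  · rw [if_pos, pvB1, if_pos hm]
    · rw [PySem.Str.toList_lstrip, PySem.Str.toList_slice]
      rw [PySem.Chars.slice_eq_listSlice]
      rw [PySem.List.slice_to x.toList ((PySem.Chars.find_nonneg_iff x.toList ['-']).mpr
        ((List.singleton_infix_iff '-' x.toList).mpr hm))]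
      rw [pv_take_find '-' x.toList hm]
    · exact (PySem.Chars.find_nonneg_iff x.toList ['-']).mpr
        ((List.singleton_infix_iff '-' x.toList).mpr hm)
  · rw [if_neg, pvB1, if_neg hm]
    intro hge
    exact hm ((List.singleton_infix_iff '-' x.toList).mp
      ((PySem.Chars.find_nonneg_iff x.toList ['-']).mp hge))

-- ===== VERDICT (by name: the statement is the Claim_ definition above) =====
theorem normalize_activo_id_py_spec : Claim_equal_normalize_activo_id_py := by
  intro s _
  unfold Spec_normalize_activo_id_py
  cases s with
  | none => rfl
  | some s0 => rw [pv_A_some, pv_B_some, pv_core]
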